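-- pv_equiv track=rewrite | github.com/joie-zhang/bargain | ui/negotiation_viewer.py | group_by_round
-- ===== SOURCE A (Python) =====
-- from typing import Dict, List, Optional, Any
--
-- def extract_round_number(entry: Dict) -> int:
--     """Extract round number from entry."""
--     return entry.get("round", 0)
--
-- def group_by_round(interactions: List[Dict]) -> Dict[int, List[Dict]]:
--     """Group interactions by round number."""
--     rounds = {}
--     for entry in interactions:
--         round_num = extract_round_number(entry)
--         if round_num not in rounds:
--             rounds[round_num] = []
--         rounds[round_num].append(entry)
--     return dict(sorted(rounds.items()))
-- ===== SOURCE B (Python) =====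
-- from itertools import groupby
--
-- def group_by_round(interactions):
--     """Group interactions by round number."""
--     key = lambda entry: entry.get("round", 0)
--     ordered = sorted(interactions, key=key)
--     return {k: list(g) for k, g in groupby(ordered, key=key)}
-- ===== Notes on version B (the rewrite author's own statement) =====
-- stated objective: idiomatic
-- what changed: B replaces A's hash-bucketing into a dict followed by sorting the items with a single stable sort by round number and one groupby pass over the sorted list.
import Mathlib
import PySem

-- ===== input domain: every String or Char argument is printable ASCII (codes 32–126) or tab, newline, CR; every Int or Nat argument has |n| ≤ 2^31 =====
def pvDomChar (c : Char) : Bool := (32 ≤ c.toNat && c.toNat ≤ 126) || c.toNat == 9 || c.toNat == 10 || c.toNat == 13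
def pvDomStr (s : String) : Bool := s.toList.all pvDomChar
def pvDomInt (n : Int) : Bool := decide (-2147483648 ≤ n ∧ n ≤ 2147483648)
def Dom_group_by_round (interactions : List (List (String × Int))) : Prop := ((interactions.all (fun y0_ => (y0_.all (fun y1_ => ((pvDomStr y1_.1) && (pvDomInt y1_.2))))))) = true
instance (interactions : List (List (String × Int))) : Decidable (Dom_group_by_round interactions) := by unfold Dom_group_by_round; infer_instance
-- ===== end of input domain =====

-- B replaces A's dict-bucketing followed by a key sort with one stable sort plus a single grouping pass (idiomatic; equal output).

-- ===== PORT A =====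
-- entry.get("round", 0)
def extract_round_number (entry : List (String × Int)) : Int :=
  (PySem.Dict.mk entry).getD "round" 0

def group_by_round (interactions : List (List (String × Int))) : List (Int × List (List (String × Int))) :=
  let rounds : PySem.Dict Int (List (List (String × Int))) :=
    interactions.foldl (fun rounds entry =>
      let round_num := extract_round_number entry
      let rounds := if rounds.contains round_num then rounds else rounds.insert round_num []
      rounds.insert round_num (rounds.getD round_num [] ++ [entry])) PySem.Dict.empty
  -- dict(sorted(rounds.items())): the dict's keys are distinct, so Python's tuple sort is the sort by key
  PySem.List.sorted rounds.items (fun p => p.1) false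

-- ===== PORT B =====
-- {k: list(g) for k, g in groupby(ordered, key=key)}: collect the maximal runs of equal key
def pvGroupRuns : List (List (String × Int)) → List (Int × List (List (String × Int)))
  | [] => []
  | e :: rest =>
    match pvGroupRuns rest with
    | [] => [(extract_round_number e, [e])]
    | (k, g) :: t =>
      if extract_round_number e = k then (k, e :: g) :: t
      else (extract_round_number e, [e]) :: (k, g) :: t

def group_by_round_alt (interactions : List (List (String × Int))) : List (Int × List (List (String × Int))) :=
  pvGroupRuns (PySem.List.sorted interactions extract_round_number false)

-- ===== PRECONDITION & SPEC =====
def Spec_group_by_round (interactions : List (List (String × Int))) (out : List (Int × List (List (String × Int)))) : Prop := out = group_by_round_alt interactions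
instance (interactions : List (List (String × Int))) (out : List (Int × List (List (String × Int)))) : Decidable (Spec_group_by_round interactions out) := by unfold Spec_group_by_round; infer_instance

-- ===== CLAIM (what is proved, stated in full; the proofs are below) =====
def Claim_equal_group_by_round : Prop := ∀ (interactions : List (List (String × Int))), Dom_group_by_round interactions → Spec_group_by_round interactions (group_by_round interactions)

-- ===== LEMMAS AND PROOFS =====

-- the common canonical form both ports are proved equal to:
-- the distinct round numbers in increasing order, each paired with its entries in input order
def pvCanon (l : List (List (String × Int))) : List (Int × List (List (String × Int))) :=
  (PySem.List.sorted (PySem.Set.ofList (l.map extract_round_number)) (fun k => k) false).map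
    (fun k => (k, l.filter (fun e => extract_round_number e == k)))

-- A's loop body with the contains-guard is exactly a Dict.modify step
lemma pvStepA (d : PySem.Dict Int (List (List (String × Int)))) (e : List (String × Int)) :
    (let r := extract_round_number e
     let d' := if d.contains r then d else d.insert r []
     d'.insert r (d'.getD r [] ++ [e])) = d.modify (extract_round_number e) [] (· ++ [e]) := by
  set r := extract_round_number e with hr
  simp only [PySem.Dict.modify]
  by_cases h : d.contains r = true
  · simp [h]
  · have h' : d.contains r = false := by simpa using h
    simp only [h', Bool.false_eq_true, if_false]
    rw [PySem.Dict.getD_insert_self, PySem.Dict.getD_of_not_contains d [] h']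
    apply PySem.Dict.ext
    rw [PySem.Dict.items_insert_of_contains _ _ (PySem.Dict.contains_insert_self d r []),
        PySem.Dict.items_insert_of_not_contains _ _ h',
        PySem.Dict.items_insert_of_not_contains _ _ h',
        List.map_append]
    congr 1
    · conv_rhs => rw [← List.map_id d.items]
      apply List.map_congr_left
      intro p hp
      have hne : p.1 ≠ r := by
        intro hpr
        have : r ∈ d.keys := hpr ▸ PySem.Dict.mem_keys_of_mem_items d hp
        rw [← PySem.Dict.contains_iff_mem_keys] at this
        simp [h'] at this
      simp [hne]
    · simp

-- the dict built by A's loop, in pair-fold form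
lemma pvFoldA (l : List (List (String × Int))) :
    l.foldl (fun rounds entry =>
      let round_num := extract_round_number entry
      let rounds := if rounds.contains round_num then rounds else rounds.insert round_num []
      rounds.insert round_num (rounds.getD round_num [] ++ [entry])) PySem.Dict.empty
    = (l.map (fun e => (extract_round_number e, e))).foldl
        (fun d p => d.modify p.1 [] (· ++ [p.2])) PySem.Dict.empty := by
  rw [List.foldl_map]
  congr 1
  funext d e
  exact pvStepA d e

lemma pvGetD_foldA (l : List (List (String × Int))) (k : Int) :
    ((l.map (fun e => (extract_round_number e, e))).foldl
        (fun d p => d.modify p.1 [] (· ++ [p.2])) PySem.Dict.empty).getD k []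
    = l.filter (fun e => extract_round_number e == k) := by
  rw [PySem.Dict.getD_foldl_modify_append, PySem.Dict.getD_empty, List.filter_map]
  simp only [List.map_map]
  rw [List.nil_append]
  have : ((fun p : Int × List (String × Int) => p.1 == k) ∘ fun e => (extract_round_number e, e))
      = fun e => extract_round_number e == k := rfl
  rw [this]
  exact List.map_id'' (fun _ => rfl) _

lemma pvKeys_foldA (l : List (List (String × Int))) :
    ((l.map (fun e => (extract_round_number e, e))).foldl
        (fun d p => d.modify p.1 [] (· ++ [p.2])) PySem.Dict.empty).keys
    = PySem.Set.ofList (l.map extract_round_number) := by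
  rw [PySem.Dict.keys_foldl_modify_key _ Prod.fst [] (fun _ p v => v ++ [p.2])]
  simp only [List.map_map, PySem.Dict.keys_empty, PySem.Set.update_nil_left]
  rfl

-- a dict with distinct keys is its key list paired with its lookups
lemma pvItems_eq_map_keys {ν : Type} (d : PySem.Dict Int ν) (d0 : ν) (h : d.keys.Nodup) :
    d.items = d.keys.map (fun k => (k, d.getD k d0)) := by
  conv_lhs => rw [← List.map_id d.items]
  simp only [PySem.Dict.keys, List.map_map]
  apply List.map_congr_left
  intro p hp
  have := PySem.Dict.getD_of_mem_items d (k := p.1) (v := p.2) (by simpa using hp) h d0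
  simp [Function.comp, this]

lemma pvA_canon (l : List (List (String × Int))) : group_by_round l = pvCanon l := by
  unfold group_by_round
  rw [pvFoldA]
  set d := (l.map (fun e => (extract_round_number e, e))).foldl
      (fun d p => d.modify p.1 [] (· ++ [p.2])) PySem.Dict.empty with hd
  have hkeys : d.keys = PySem.Set.ofList (l.map extract_round_number) := pvKeys_foldA l
  have hnd : d.keys.Nodup := by rw [hkeys]; exact PySem.Set.nodup_ofList _
  show PySem.List.sorted d.items (fun p => p.1) false = pvCanon l
  rw [pvItems_eq_map_keys d [] hnd, hkeys]
  have hmap : (PySem.Set.ofList (l.map extract_round_number)).map (fun k => (k, d.getD k []))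
      = (PySem.Set.ofList (l.map extract_round_number)).map
          (fun k => (k, l.filter (fun e => extract_round_number e == k))) :=
    List.map_congr_left (fun k _ => by rw [pvGetD_foldA])
  rw [hmap]
  unfold pvCanon
  apply PySem.List.sorted_eq_of_perm_of_pairwise_lt
  · exact (PySem.List.sorted_perm _ _ _).map _
  · rw [List.pairwise_map]
    exact PySem.List.sorted_ofList_pairwise_lt _

-- stability of the sort: inserting one element never reorders a round's entries
lemma pvFilter_insertBy (x : List (String × Int)) (ys : List (List (String × Int))) (k : Int)
    (hys : ys.Pairwise (fun a b => extract_round_number a ≤ extract_round_number b)) :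
    (PySem.List.insertBy (fun a b => decide (extract_round_number a < extract_round_number b)) x ys).filter
        (fun e => extract_round_number e == k)
    = ys.filter (fun e => extract_round_number e == k) ++
        (if extract_round_number x == k then [x] else []) := by
  induction ys with
  | nil => simp [PySem.List.insertBy]; split <;> simp_all
  | cons y ys ih =>
    rw [List.pairwise_cons] at hys
    simp only [PySem.List.insertBy]
    by_cases hlt : extract_round_number x < extract_round_number y
    · simp only [hlt, decide_true, if_true]
      by_cases hxk : extract_round_number x == k
      · have hk : extract_round_number x = k := by simpa using hxk
        have hnil : (y :: ys).filter (fun e => extract_round_number e == k) = [] := by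
          apply List.filter_eq_nil_iff.mpr
          intro e he
          have hy : extract_round_number y ≤ extract_round_number e := by
            cases he with
            | head => exact le_refl _
            | tail _ he => exact hys.1 e he
          have : k < extract_round_number e := lt_of_lt_of_le (hk ▸ hlt) hy
          simp [Int.ne_of_gt this]
        rw [List.filter_cons]
        simp only [hnil, hk]
        simp
      · have hxk' : (extract_round_number x == k) = false := by simpa using hxk
        simp [List.filter_cons, hxk']
    · simp only [hlt, decide_false, Bool.false_eq_true, if_false]
      rw [List.filter_cons, List.filter_cons, ih hys.2]
      split <;> simp

-- stability of the sort: the entries of any one round keep their input order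
lemma pvFilter_sorted (l : List (List (String × Int))) (k : Int) :
    (PySem.List.sorted l extract_round_number false).filter (fun e => extract_round_number e == k)
    = l.filter (fun e => extract_round_number e == k) := by
  induction l using List.reverseRecOn with
  | nil => rfl
  | append_singleton l x ih =>
    rw [PySem.List.sorted_eq_foldl_insertBy, List.foldl_append, List.foldl_cons, List.foldl_nil,
        ← PySem.List.sorted_eq_foldl_insertBy]
    rw [pvFilter_insertBy _ _ _ (PySem.List.sorted_pairwise l extract_round_number), ih,
        List.filter_append, List.filter_cons]
    split <;> simp

-- set(xs) is a sublist of xs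
lemma pvOfList_sublist {α : Type} [BEq α] [LawfulBEq α] (xs : List α) :
    (PySem.Set.ofList xs).Sublist xs := by
  induction xs with
  | nil => simp [PySem.Set.ofList]
  | cons x xs ih =>
    rw [PySem.Set.ofList_cons]
    have hd : ((PySem.Set.ofList xs).discard x).Sublist (PySem.Set.ofList xs) := by
      simp only [PySem.Set.discard]
      exact List.filter_sublist
    exact List.Sublist.cons₂ x (hd.trans ih)

-- groupby over a key-sorted list, in closed form
lemma pvRuns_eq (s : List (List (String × Int)))
    (hs : (s.map extract_round_number).Pairwise (· ≤ ·)) :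
    pvGroupRuns s = (PySem.List.dedup (s.map extract_round_number)).map
      (fun k => (k, s.filter (fun e => extract_round_number e == k))) := by
  induction s with
  | nil => rfl
  | cons e rest ih =>
    simp only [List.map_cons, List.pairwise_cons] at hs
    obtain ⟨hle, hrest⟩ := hs
    have hle' : ∀ b ∈ rest.map extract_round_number, extract_round_number e ≤ b := by simpa using hle
    have hhead : PySem.List.dedup ((e :: rest).map extract_round_number)
        = extract_round_number e ::
            (PySem.List.dedup (rest.map extract_round_number)).filter
              (fun y => !(y == extract_round_number e)) := by
      rw [List.map_cons, PySem.List.dedup_eq_ofList, PySem.Set.ofList_cons]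
      rfl
    cases rest with
    | nil => simp [pvGroupRuns, PySem.List.dedup, PySem.Set.ofList, PySem.Set.add]
    | cons r rest' =>
      have ihr := ih hrest
      have hded : PySem.List.dedup ((r :: rest').map extract_round_number)
          = extract_round_number r ::
              (PySem.List.dedup (rest'.map extract_round_number)).filter
                (fun y => !(y == extract_round_number r)) := by
        rw [List.map_cons, PySem.List.dedup_eq_ofList, PySem.Set.ofList_cons]
        rfl
      by_cases hmem : extract_round_number e ∈ (r :: rest').map extract_round_number
      · -- key e repeats the head key of the (sorted) tail
        have hk0 : extract_round_number e = extract_round_number r := by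
          have h1 : extract_round_number e ≤ extract_round_number r := hle' _ (by simp)
          rcases (by simpa using hmem :
              extract_round_number e = extract_round_number r ∨
                extract_round_number e ∈ rest'.map extract_round_number) with h | h
          · exact h
          · have h2 : extract_round_number r ≤ extract_round_number e := by
              rw [List.map_cons, List.pairwise_cons] at hrest
              exact hrest.1 _ h
            omega
        have hfull : PySem.List.dedup ((e :: r :: rest').map extract_round_number)
            = PySem.List.dedup ((r :: rest').map extract_round_number) := by
          rw [hhead, hded, hk0, List.filter_cons]
          simp only [beq_self_eq_true, Bool.not_true, Bool.false_eq_true, if_false]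
          rw [List.filter_filter]
          simp only [Bool.and_self]
        have step : ∀ (x : List (String × Int)) (l : List (List (String × Int))),
            pvGroupRuns (x :: l) = (match pvGroupRuns l with
              | [] => [(extract_round_number x, [x])]
              | (k, g) :: t => if extract_round_number x = k then (k, x :: g) :: t
                else (extract_round_number x, [x]) :: (k, g) :: t) := fun _ _ => rfl
        rw [hfull, hded, step, ihr, hded]
        simp only [List.map_cons, hk0, reduceIte]
        congr 1
        · rw [List.filter_cons]
          simp [hk0]
        · apply List.map_congr_left
          intro k hk
          have hne : (extract_round_number e == k) = false := by
            rw [List.mem_filter] at hk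
            have := hk.2
            simp only [Bool.not_eq_eq_eq_not, Bool.not_true, beq_eq_false_iff_ne] at this ⊢
            omega
          conv_rhs => rw [List.filter_cons]
          rw [hne]
          simp
      · -- key e starts a fresh (strictly smaller) round
        have hfull : PySem.List.dedup ((e :: r :: rest').map extract_round_number)
            = extract_round_number e ::
                PySem.List.dedup ((r :: rest').map extract_round_number) := by
          rw [hhead]
          congr 1
          apply List.filter_eq_self.mpr
          intro k hk
          have : k ∈ (r :: rest').map extract_round_number := by
            rw [PySem.List.dedup_eq_ofList] at hk
            exact (PySem.Set.mem_ofList _ _).mp hk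
          simp only [Bool.not_eq_eq_eq_not, Bool.not_true, beq_eq_false_iff_ne]
          exact fun h => hmem (h ▸ this)
        have step : ∀ (x : List (String × Int)) (l : List (List (String × Int))),
            pvGroupRuns (x :: l) = (match pvGroupRuns l with
              | [] => [(extract_round_number x, [x])]
              | (k, g) :: t => if extract_round_number x = k then (k, x :: g) :: t
                else (extract_round_number x, [x]) :: (k, g) :: t) := fun _ _ => rfl
        have hner : extract_round_number e ≠ extract_round_number r := fun h => hmem (by simp [h])
        rw [hfull, step, ihr, hded]
        simp only [List.map_cons, hner, if_false]
        have hfresh : ∀ k : Int, k ∈ (r :: rest').map extract_round_number →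
            (e :: r :: rest').filter (fun x => extract_round_number x == k)
            = (r :: rest').filter (fun x => extract_round_number x == k) := by
          intro k hk
          have hne : (extract_round_number e == k) = false := by
            simp only [beq_eq_false_iff_ne, ne_eq]
            exact fun h => hmem (h ▸ hk)
          rw [List.filter_cons, hne]
          simp
        congr 1
        · -- the new head group is [e]
          have h2 : (r :: rest').filter (fun x => extract_round_number x == extract_round_number e)
              = [] := by
            apply List.filter_eq_nil_iff.mpr
            intro x hx
            have : extract_round_number x ∈ (r :: rest').map extract_round_number :=
              List.mem_map_of_mem hx
            simp only [ne_eq, beq_iff_eq]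
            exact fun h => hmem (h ▸ this)
          rw [List.filter_cons]
          simp [h2]
        congr 1
        · rw [hfresh (extract_round_number r) (by simp)]
        · apply List.map_congr_left
          intro k hk
          rw [List.mem_filter] at hk
          have : k ∈ (r :: rest').map extract_round_number := by
            have := hk.1
            rw [PySem.List.dedup_eq_ofList] at this
            exact List.mem_cons_of_mem _ ((PySem.Set.mem_ofList _ _).mp this)
          rw [hfresh k this]

-- the sorted distinct keys of l are exactly the run heads of the sorted list
lemma pvSortedKeys (l : List (List (String × Int))) :
    PySem.List.sorted (PySem.Set.ofList (l.map extract_round_number)) (fun k => k) false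
    = PySem.List.dedup ((PySem.List.sorted l extract_round_number false).map extract_round_number) := by
  apply PySem.List.sorted_eq_of_perm_of_pairwise_lt
  · rw [List.perm_ext_iff_of_nodup
      (by rw [PySem.List.dedup_eq_ofList]; exact PySem.Set.nodup_ofList _)
      (PySem.Set.nodup_ofList _)]
    intro a
    rw [PySem.List.dedup_eq_ofList, PySem.Set.mem_ofList, PySem.Set.mem_ofList]
    constructor
    · intro h
      obtain ⟨x, hx, rfl⟩ := List.mem_map.mp h
      exact List.mem_map_of_mem ((PySem.List.mem_sorted l extract_round_number false x).mp hx)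
    · intro h
      obtain ⟨x, hx, rfl⟩ := List.mem_map.mp h
      exact List.mem_map_of_mem ((PySem.List.mem_sorted l extract_round_number false x).mpr hx)
  · have hsub := pvOfList_sublist ((PySem.List.sorted l extract_round_number false).map extract_round_number)
    rw [← PySem.List.dedup_eq_ofList] at hsub
    have hle := (PySem.List.sorted_map_key_pairwise l extract_round_number).sublist hsub
    have hnd : (PySem.List.dedup
        ((PySem.List.sorted l extract_round_number false).map extract_round_number)).Nodup := by
      rw [PySem.List.dedup_eq_ofList]; exact PySem.Set.nodup_ofList _
    have := hle.and (List.Pairwise.imp (fun h => h) hnd)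
    exact this.imp (fun ⟨h1, h2⟩ => lt_of_le_of_ne h1 h2)

lemma pvB_canon (l : List (List (String × Int))) : group_by_round_alt l = pvCanon l := by
  unfold group_by_round_alt pvCanon
  rw [pvRuns_eq _ (PySem.List.sorted_map_key_pairwise l extract_round_number), pvSortedKeys]
  apply List.map_congr_left
  intro k _
  rw [pvFilter_sorted]

-- ===== VERDICT (by name: the statement is the Claim_ definition above) =====
theorem group_by_round_spec : Claim_equal_group_by_round := by
  intro l _
  show group_by_round l = group_by_round_alt l
  rw [pvA_canon, pvB_canon]
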